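-- pv_equiv track=rewrite | github.com/ngdhuy/SE_01_Python | Lab02/Module/Module07.py | find_second_even_number
-- ===== SOURCE A (Python) =====
-- def find_second_even_number(arr):
--     flag_first_even = False
--     index = 0
--     for item in arr:
--         if item % 2 == 0:
--             if not flag_first_even:
--                 flag_first_even = True
--             else:
--                 return index
--         index += 1
--     else:
--         return -1
-- ===== SOURCE B (Python) =====
-- def find_second_even_number(arr):
--     evens = [i for i, x in enumerate(arr) if x % 2 == 0]
--     return evens[1] if len(evens) >= 2 else -1
-- ===== Notes on version B (the rewrite author's own statement) =====
-- stated objective: simpler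
-- what changed: Replaces the flag-and-early-return single pass with a build-the-list-of-even-indices-then-subscript decomposition (enumerate + comprehension + evens[1]).
import Mathlib
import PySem

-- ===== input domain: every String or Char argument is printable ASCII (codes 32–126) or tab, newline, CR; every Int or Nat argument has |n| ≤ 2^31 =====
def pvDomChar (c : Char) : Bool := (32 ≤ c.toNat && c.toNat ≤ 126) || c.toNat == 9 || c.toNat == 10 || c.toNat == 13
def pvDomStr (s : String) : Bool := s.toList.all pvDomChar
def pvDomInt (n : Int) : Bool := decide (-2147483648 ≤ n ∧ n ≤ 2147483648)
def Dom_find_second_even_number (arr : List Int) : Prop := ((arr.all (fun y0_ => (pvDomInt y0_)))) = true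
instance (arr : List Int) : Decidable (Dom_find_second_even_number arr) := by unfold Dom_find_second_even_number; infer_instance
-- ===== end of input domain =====

-- B replaces A's flag-and-early-return scan with collecting all even indices and subscripting; objective: simpler decomposition.
-- ===== PORT A =====
def pvGoA : List Int → Bool → Int → Int
  | [], _, _ => -1
  | item :: rest, flag_first_even, index =>
    if PySem.Int.mod item 2 == 0 then
      if !flag_first_even then pvGoA rest true (index + 1)
      else index
    else pvGoA rest flag_first_even (index + 1)

def find_second_even_number (arr : List Int) : Int := pvGoA arr false 0

-- ===== PORT B =====
def find_second_even_number_alt (arr : List Int) : Int :=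
  let evens := ((PySem.List.enumerate arr 0).filter (fun p => PySem.Int.mod p.2 2 == 0)).map (fun p => p.1)
  if 2 ≤ evens.length then evens.getD 1 (-1) else -1

-- ===== PRECONDITION & SPEC =====
def Spec_find_second_even_number (arr : List Int) (out : Int) : Prop := out = find_second_even_number_alt arr
instance (arr : List Int) (out : Int) : Decidable (Spec_find_second_even_number arr out) := by unfold Spec_find_second_even_number; infer_instance

-- ===== CLAIM (what is proved, stated in full; the proofs are below) =====
def Claim_equal_find_second_even_number : Prop := ∀ (arr : List Int), Dom_find_second_even_number arr → Spec_find_second_even_number arr (find_second_even_number arr)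

-- ===== LEMMAS AND PROOFS =====

-- even indices of xs, when enumeration starts at k
def pvEvens (xs : List Int) (k : Int) : List Int :=
  ((PySem.List.enumerate xs k).filter (fun p => PySem.Int.mod p.2 2 == 0)).map (fun p => p.1)

lemma pvEvens_cons (x : Int) (xs : List Int) (k : Int) :
    pvEvens (x :: xs) k =
      if PySem.Int.mod x 2 == 0 then k :: pvEvens xs (k + 1) else pvEvens xs (k + 1) := by
  simp [pvEvens, PySem.List.enumerate_cons, List.filter]
  split <;> simp_all

lemma pvGoA_eq (xs : List Int) (flag : Bool) (k : Int) :
    pvGoA xs flag k =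
      (if flag then (pvEvens xs k).headD (-1)
       else match pvEvens xs k with
            | _ :: j :: _ => j
            | _ => -1) := by
  induction xs generalizing flag k with
  | nil => cases flag <;> simp [pvGoA, pvEvens, PySem.List.enumerate]
  | cons x xs ih =>
    rw [show pvGoA (x :: xs) flag k =
        (if PySem.Int.mod x 2 == 0 then
          (if !flag then pvGoA xs true (k + 1) else k)
        else pvGoA xs flag (k + 1)) from rfl, pvEvens_cons]
    by_cases hx : PySem.Int.mod x 2 == 0
    · simp only [hx, if_true]
      cases flag with
      | true => simp
      | false =>
        simp only [Bool.not_false, if_true, ih]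
        cases pvEvens xs (k + 1) <;> simp
    · simp only [Bool.not_eq_true] at hx
      simp only [hx, if_neg, Bool.false_eq_true, not_false_iff, ih]

lemma alt_eq_match (arr : List Int) :
    find_second_even_number_alt arr =
      (match pvEvens arr 0 with
       | _ :: j :: _ => j
       | _ => -1) := by
  show (if 2 ≤ (pvEvens arr 0).length then (pvEvens arr 0).getD 1 (-1) else -1) = _
  cases h : pvEvens arr 0 with
  | nil => simp
  | cons a t => cases t <;> simp [List.getD]

-- ===== VERDICT (by name: the statement is the Claim_ definition above) =====
theorem find_second_even_number_spec : Claim_equal_find_second_even_number := by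
  intro arr _
  show find_second_even_number arr = find_second_even_number_alt arr
  rw [alt_eq_match]
  simpa using pvGoA_eq arr false 0
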